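-- pv_equiv track=rewrite | github.com/mmamontx/trunk | coursera/c4/w4/suffix_array_long/suffix_array_long.py | ComputeCharClasses
-- ===== SOURCE A (Python) =====
-- def ComputeCharClasses(S, order):
--   clas = [0 for i in range(len(S))]
--   clas[order[0]] = 0
--   for i in range(1, len(S)):
--     if S[order[i]] != S[order[i - 1]]:
--       clas[order[i]] = clas[order[i - 1]] + 1
--     else:
--       clas[order[i]] = clas[order[i - 1]]
--   return clas
-- ===== SOURCE B (Python) =====
-- def _count_le(sorted_list, x):
--     # number of elements of sorted_list (ascending) that are <= x, by binary search
--     lo = 0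
--     hi = len(sorted_list)
--     while lo < hi:
--         mid = (lo + hi) // 2
--         if sorted_list[mid] <= x:
--             lo = mid + 1
--         else:
--             hi = mid
--     return lo
--
--
-- def ComputeCharClasses(S, order):
--     n = len(S)
--     # change points: ranks whose character differs from the previous rank's
--     bounds = [i for i in range(1, n) if S[order[i]] != S[order[i - 1]]]
--     clas = [0] * n
--     for i in range(n):
--         # class of rank i = number of change points at or before rank i
--         clas[order[i]] = _count_le(bounds, i)
--     return clas
-- ===== Notes on version B (the rewrite author's own statement) =====
-- stated objective: alternative
-- what changed: A assigns classes in one interleaved pass that reads the previous class back out of the output array; B instead builds the list of change points (ranks where the character differs from the previous rank) once and computes each rank's class independently as the number of change points at or before it, found by binary search.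
import Mathlib
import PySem

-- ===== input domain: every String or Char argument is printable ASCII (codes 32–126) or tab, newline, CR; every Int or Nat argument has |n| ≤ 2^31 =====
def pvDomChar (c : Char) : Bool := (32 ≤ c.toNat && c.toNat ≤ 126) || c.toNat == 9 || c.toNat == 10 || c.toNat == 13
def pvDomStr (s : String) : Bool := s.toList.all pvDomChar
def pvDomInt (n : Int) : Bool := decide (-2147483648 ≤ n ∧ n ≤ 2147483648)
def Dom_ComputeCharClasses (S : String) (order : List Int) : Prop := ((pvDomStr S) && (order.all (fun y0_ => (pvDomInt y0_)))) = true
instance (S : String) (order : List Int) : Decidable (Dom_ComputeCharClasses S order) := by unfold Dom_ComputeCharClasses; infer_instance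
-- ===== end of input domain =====

-- B replaces A's interleaved in-place accumulation by a different algorithm: build the
-- list of change points once, then compute each rank's class independently as the number
-- of change points at or before it, found by binary search (O(n log n), alternative).

-- ===== PORT A =====
def ComputeCharClasses (S : String) (order : List Int) : List Int :=
  let cs := S.toList
  let clas := List.replicate cs.length (0 : Int)
  let clas := PySem.List.pySetD clas (PySem.List.pyGetD order 0 0) 0
  (PySem.List.pyRange 1 cs.length 1).foldl (fun clas i =>
    if PySem.List.pyGetD cs (PySem.List.pyGetD order i 0) ' '
         ≠ PySem.List.pyGetD cs (PySem.List.pyGetD order (i - 1) 0) ' ' then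
      PySem.List.pySetD clas (PySem.List.pyGetD order i 0)
        (PySem.List.pyGetD clas (PySem.List.pyGetD order (i - 1) 0) 0 + 1)
    else
      PySem.List.pySetD clas (PySem.List.pyGetD order i 0)
        (PySem.List.pyGetD clas (PySem.List.pyGetD order (i - 1) 0) 0)) clas

-- ===== PORT B =====
-- _count_le: binary search; the index mid is always in range, pyGetD is exact there
def pvCountLe (l : List Int) (x : Int) (lo hi : Nat) : Nat :=
  if h : lo < hi then
    if PySem.List.pyGetD l (((lo + hi) / 2 : Nat) : Int) 0 ≤ x then
      pvCountLe l x ((lo + hi) / 2 + 1) hi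
    else
      pvCountLe l x lo ((lo + hi) / 2)
  else lo
termination_by hi - lo
decreasing_by all_goals omega

def ComputeCharClasses_alt (S : String) (order : List Int) : List Int :=
  let cs := S.toList
  let n := cs.length
  -- change points: ranks whose character differs from the previous rank's
  let bounds := (PySem.List.pyRange 1 n 1).filter (fun i =>
    PySem.List.pyGetD cs (PySem.List.pyGetD order i 0) ' '
      ≠ PySem.List.pyGetD cs (PySem.List.pyGetD order (i - 1) 0) ' ')
  -- class of rank i = number of change points at or before rank i
  (PySem.List.pyRange 0 n 1).foldl (fun clas i =>
      PySem.List.pySetD clas (PySem.List.pyGetD order i 0)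
        ((pvCountLe bounds i 0 bounds.length : Nat) : Int))
    (List.replicate n (0 : Int))

-- ===== PRECONDITION & SPEC =====
-- Pre_ is exactly where the Python A returns: it excludes only the inputs on which A
-- raises IndexError (empty S; order shorter than S; an order entry out of range for S).
def Pre_ComputeCharClasses (S : String) (order : List Int) : Prop :=
  S.toList ≠ [] ∧ S.toList.length ≤ order.length ∧
  ∀ j < S.toList.length, PySem.Raise.InRange S.toList.length (order.getD j 0)

instance (S : String) (order : List Int) : Decidable (Pre_ComputeCharClasses S order) := by
  unfold Pre_ComputeCharClasses PySem.Raise.InRange; infer_instance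

def pvWitness_ComputeCharClasses : String × List Int := ("ab", [1, 0])

def Spec_ComputeCharClasses (S : String) (order : List Int) (out : List Int) : Prop := out = ComputeCharClasses_alt S order
instance (S : String) (order : List Int) (out : List Int) : Decidable (Spec_ComputeCharClasses S order out) := by unfold Spec_ComputeCharClasses; infer_instance

-- ===== CLAIM (what is proved, stated in full; the proofs are below) =====
def Claim_equal_ComputeCharClasses : Prop := ∀ (S : String) (order : List Int), Dom_ComputeCharClasses S order → Pre_ComputeCharClasses S order → Spec_ComputeCharClasses S order (ComputeCharClasses S order)


-- ===== LEMMAS AND PROOFS =====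

-- normalized (wrapped) Python index, valid under Raise.InRange
def pvNIdx (n : Nat) (i : Int) : Nat := if 0 ≤ i then i.toNat else n - (-i).toNat

-- the Bool change flag between sorted ranks j-1 and j (used with 1 ≤ j)
def pvFlagB (cs : List Char) (order : List Int) (j : Nat) : Bool :=
  decide (PySem.List.pyGetD cs (order.getD j 0) ' '
       ≠ PySem.List.pyGetD cs (order.getD (j - 1) 0) ' ')

-- class of the element of sorted rank j
def pvRank (cs : List Char) (order : List Int) : Nat → Int
  | 0 => 0
  | j + 1 => pvRank cs order j + (if pvFlagB cs order (j + 1) then 1 else 0)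

-- classes of the first k ranks scattered into position
def pvScatter (cs : List Char) (order : List Int) (k : Nat) : List Int :=
  (List.range k).foldl
    (fun clas j => clas.set (pvNIdx cs.length (order.getD j 0)) (pvRank cs order j))
    (List.replicate cs.length 0)

theorem pvNIdx_lt {n : Nat} {i : Int} (h : PySem.Raise.InRange n i) :
    pvNIdx n i < n := by
  obtain ⟨h1, h2⟩ := h
  unfold pvNIdx
  split_ifs with h0 <;> omega

theorem pvIdx?_eq {n : Nat} {i : Int} (h : PySem.Raise.InRange n i) :
    PySem.List.pyIdx? n i = some (pvNIdx n i) := by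
  obtain ⟨h1, h2⟩ := h
  unfold PySem.List.pyIdx? pvNIdx
  split_ifs <;> rfl

theorem pvGetD_eq {α : Type} {xs : List α} {i : Int} {d : α}
    (h : PySem.Raise.InRange xs.length i) :
    PySem.List.pyGetD xs i d = xs.getD (pvNIdx xs.length i) d := by
  simp [PySem.List.pyGetD, PySem.List.pyGet?, pvIdx?_eq h, List.getD_eq_getElem?_getD]

theorem pvSetD_eq {α : Type} {xs : List α} {i : Int} {v : α}
    (h : PySem.Raise.InRange xs.length i) :
    PySem.List.pySetD xs i v = xs.set (pvNIdx xs.length i) v := by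
  simp [PySem.List.pySetD, PySem.List.pySet?, pvIdx?_eq h]

theorem pv_foldl_set_length {α : Type} (f : Nat → Nat) (g : Nat → α) :
    ∀ (l : List Nat) (init : List α),
      (l.foldl (fun clas j => clas.set (f j) (g j)) init).length = init.length := by
  intro l
  induction l with
  | nil => intro init; rfl
  | cons x xs ih => intro init; rw [List.foldl_cons, ih, List.length_set]

theorem pvScatter_length (cs : List Char) (order : List Int) (k : Nat) :
    (pvScatter cs order k).length = cs.length := by
  unfold pvScatter
  rw [pv_foldl_set_length]
  exact List.length_replicate

theorem pvScatter_succ (cs : List Char) (order : List Int) (k : Nat) :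
    pvScatter cs order (k + 1)
      = (pvScatter cs order k).set (pvNIdx cs.length (order.getD k 0)) (pvRank cs order k) := by
  unfold pvScatter
  rw [List.range_succ, List.foldl_append]
  rfl

theorem pvScatter_read (cs : List Char) (order : List Int) (k : Nat)
    (h : PySem.Raise.InRange cs.length (order.getD k 0)) :
    (pvScatter cs order (k + 1)).getD (pvNIdx cs.length (order.getD k 0)) 0
      = pvRank cs order k := by
  rw [pvScatter_succ, List.getD_eq_getElem?_getD, List.getElem?_set_self]
  · rfl
  · rw [pvScatter_length]
    exact pvNIdx_lt h

theorem pvRank_step (cs : List Char) (order : List Int) (k : Nat) :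
    pvRank cs order (k + 1)
      = if PySem.List.pyGetD cs (order.getD (k + 1) 0) ' '
            ≠ PySem.List.pyGetD cs (order.getD k 0) ' '
        then pvRank cs order k + 1 else pvRank cs order k := by
  show pvRank cs order k + _ = _
  unfold pvFlagB
  simp only [Nat.add_sub_cancel, decide_not]
  split_ifs with h1 h2 h2 <;> simp_all

theorem pvA_loop (cs : List Char) (order : List Int)
    (hr : ∀ j < cs.length, PySem.Raise.InRange cs.length (order.getD j 0))
    (hn : 0 < cs.length) :
    ∀ k, k + 1 ≤ cs.length →
      (List.range k).foldl (fun clas (j : Nat) =>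
        (fun clas i =>
          if PySem.List.pyGetD cs (PySem.List.pyGetD order i 0) ' '
               ≠ PySem.List.pyGetD cs (PySem.List.pyGetD order (i - 1) 0) ' ' then
            PySem.List.pySetD clas (PySem.List.pyGetD order i 0)
              (PySem.List.pyGetD clas (PySem.List.pyGetD order (i - 1) 0) 0 + 1)
          else
            PySem.List.pySetD clas (PySem.List.pyGetD order i 0)
              (PySem.List.pyGetD clas (PySem.List.pyGetD order (i - 1) 0) 0)) clas (1 + (j : Int)))
        (PySem.List.pySetD (List.replicate cs.length (0 : Int)) (PySem.List.pyGetD order 0 0) 0)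
      = pvScatter cs order (k + 1) := by
  intro k
  induction k with
  | zero =>
    intro _
    have h0 := hr 0 hn
    simp only [List.range_zero, List.foldl_nil, PySem.List.pyGetD_zero]
    rw [pvSetD_eq (by simpa using h0)]
    simp [pvScatter, pvRank]
  | succ k ih =>
    intro hk
    rw [List.range_succ, List.foldl_append, ih (by omega), List.foldl_cons, List.foldl_nil]
    have hc1 : (1 + (k : Int)) = ((k + 1 : Nat) : Int) := by push_cast; ring
    have hc2 : (((k + 1 : Nat) : Int)) - 1 = ((k : Nat) : Int) := by push_cast; ring
    have hlen := pvScatter_length cs order (k + 1)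
    have hrk : PySem.Raise.InRange cs.length (order.getD k 0) := hr k (by omega)
    have hrk1 : PySem.Raise.InRange cs.length (order.getD (k + 1) 0) := hr (k + 1) (by omega)
    have hget : PySem.List.pyGetD (pvScatter cs order (k + 1)) (order.getD k 0) 0
        = pvRank cs order k := by
      rw [pvGetD_eq (by rw [hlen]; exact hrk), hlen]
      exact pvScatter_read cs order k hrk
    have hset : ∀ v : Int, PySem.List.pySetD (pvScatter cs order (k + 1)) (order.getD (k + 1) 0) v
        = (pvScatter cs order (k + 1)).set (pvNIdx cs.length (order.getD (k + 1) 0)) v := by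
      intro v
      rw [pvSetD_eq (by rw [hlen]; exact hrk1), hlen]
    simp only [hc1, hc2, PySem.List.pyGetD_natCast, hget, hset]
    rw [pvScatter_succ cs order (k + 1), pvRank_step]
    split_ifs <;> rfl

-- countP of a list whose satisfying elements occupy exactly the first k positions
theorem pv_countP_boundary (l : List Int) (p : Int → Bool) (k : Nat) (hk : k ≤ l.length)
    (h1 : ∀ j, (hj : j < k) → p (l[j]'(by omega)) = true)
    (h2 : ∀ j, (hj : j < l.length) → k ≤ j → p (l[j]) = false) :
    l.countP p = k := by
  have hsplit : l = l.take k ++ l.drop k := (List.take_append_drop k l).symm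
  rw [hsplit, List.countP_append]
  have ht : (l.take k).countP p = (l.take k).length := by
    apply List.countP_eq_length.mpr
    intro a ha
    obtain ⟨i, hi, hia⟩ := List.mem_iff_getElem.mp ha
    have hi' : i < k := by
      have := hi; simp [List.length_take] at this; omega
    rw [← hia, List.getElem_take]
    exact h1 i hi'
  have hd : (l.drop k).countP p = 0 := by
    apply List.countP_eq_zero.mpr
    intro a ha
    obtain ⟨i, hi, hia⟩ := List.mem_iff_getElem.mp ha
    rw [← hia, List.getElem_drop]
    simp only [List.length_drop] at hi
    simp [h2 (k + i) (by omega) (by omega)]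
  rw [ht, hd, List.length_take]
  omega

-- binary-search invariant: pvCountLe finds the number of elements ≤ x of a sorted list
theorem pvCountLe_run (l : List Int) (x : Int) :
    ∀ fuel lo hi, hi - lo ≤ fuel → lo ≤ hi → hi ≤ l.length →
      l.Pairwise (· ≤ ·) →
      (∀ j, j < lo → (hj : j < l.length) → l[j] ≤ x) →
      (∀ j, hi ≤ j → (hj : j < l.length) → ¬ l[j] ≤ x) →
      pvCountLe l x lo hi = l.countP (fun a => decide (a ≤ x)) := by
  intro fuel
  induction fuel with
  | zero =>
    intro lo hi hf hlh hhl hp hlow hhigh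
    have heq : lo = hi := by omega
    rw [pvCountLe]
    simp only [heq, lt_irrefl, dite_false]
    refine (pv_countP_boundary l _ hi (by omega) ?_ ?_).symm
    · intro j hj; exact decide_eq_true (hlow j (by omega) (by omega))
    · intro j hj hji; exact decide_eq_false (hhigh j hji hj)
  | succ fuel ih =>
    intro lo hi hf hlh hhl hp hlow hhigh
    rw [pvCountLe]
    by_cases h : lo < hi
    · simp only [h, dite_true]
      have hmid1 : lo ≤ (lo + hi) / 2 := by omega
      have hmid2 : (lo + hi) / 2 < hi := by omega
      have hmlen : (lo + hi) / 2 < l.length := by omega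
      have hget : PySem.List.pyGetD l (((lo + hi) / 2 : Nat) : Int) 0
          = l[(lo + hi) / 2] := by
        rw [PySem.List.pyGetD_natCast]
        simp [List.getD_eq_getElem?_getD, List.getElem?_eq_getElem hmlen]
      rw [hget]
      have hsorted := List.pairwise_iff_getElem.mp hp
      by_cases hc : l[(lo + hi) / 2] ≤ x
      · simp only [hc, if_true]
        apply ih ((lo + hi) / 2 + 1) hi (by omega) (by omega) hhl hp
        · intro j hj hjl
          rcases Nat.lt_or_ge j ((lo + hi) / 2) with hj' | hj'
          · exact le_trans (hsorted j ((lo + hi) / 2) hjl hmlen hj') hc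
          · have : j = (lo + hi) / 2 := by omega
            subst this; exact hc
        · exact hhigh
      · simp only [hc, if_false]
        apply ih lo ((lo + hi) / 2) (by omega) (by omega) (by omega) hp hlow
        intro j hj hjl hle
        rcases Nat.lt_or_ge ((lo + hi) / 2) j with hj' | hj'
        · exact hc (le_trans (hsorted ((lo + hi) / 2) j hmlen hjl hj') hle)
        · have : j = (lo + hi) / 2 := by omega
          subst this; exact hc hle
    · simp only [h, dite_false]
      refine (pv_countP_boundary l _ lo (by omega) ?_ ?_).symm
      · intro j hj; exact decide_eq_true (hlow j hj (by omega))
      · intro j hj hji; exact decide_eq_false (hhigh j (by omega) hj)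

-- the change-point list of B, named for the proofs
def pvBounds (cs : List Char) (order : List Int) : List Int :=
  (PySem.List.pyRange 1 cs.length 1).filter (fun i =>
    PySem.List.pyGetD cs (PySem.List.pyGetD order i 0) ' '
      ≠ PySem.List.pyGetD cs (PySem.List.pyGetD order (i - 1) 0) ' ')

theorem pvBounds_sorted (cs : List Char) (order : List Int) :
    (pvBounds cs order).Pairwise (· ≤ ·) := by
  unfold pvBounds
  exact ((PySem.List.pairwise_lt_pyRange_one 1 cs.length).filter _).imp le_of_lt

-- counting with a cut-off over a range: only the first k entries can satisfy
theorem pv_countP_range_cut (f : Nat → Bool) (m k : Nat) (hk : k ≤ m) :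
    (List.range m).countP (fun j => decide (j < k) && f j)
      = (List.range k).countP f := by
  have hm : m = k + (m - k) := by omega
  rw [hm, List.range_add, List.countP_append]
  have h1 : (List.range k).countP (fun j => decide (j < k) && f j)
      = (List.range k).countP f := by
    apply List.countP_congr
    intro a ha
    simp [List.mem_range.mp ha]
  have h2 : ((List.range (m - k)).map (k + ·)).countP (fun j => decide (j < k) && f j) = 0 := by
    apply List.countP_eq_zero.mpr
    intro a ha
    obtain ⟨b, _, hb⟩ := List.mem_map.mp ha
    simp [← hb]
  rw [h1, h2]
  omega

theorem pvRank_eq_countP (cs : List Char) (order : List Int) (k : Nat) :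
    pvRank cs order k
      = (((List.range k).countP (fun j => pvFlagB cs order (j + 1)) : Nat) : Int) := by
  induction k with
  | zero => simp [pvRank]
  | succ k ih =>
    show pvRank cs order k + _ = _
    rw [List.range_succ, List.countP_append, ih]
    by_cases hb : pvFlagB cs order (k + 1) <;> simp [hb]

-- B's per-rank value: the binary search over the change points computes pvRank
theorem pvCountLe_eq_rank (cs : List Char) (order : List Int) (k : Nat)
    (hk : k < cs.length) :
    ((pvCountLe (pvBounds cs order) (k : Int) 0 (pvBounds cs order).length : Nat) : Int)
      = pvRank cs order k := by
  rw [pvCountLe_run (pvBounds cs order) k (pvBounds cs order).length 0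
        (pvBounds cs order).length (by omega) (by omega) (le_refl _)
        (pvBounds_sorted cs order)
        (by intro j hj _; omega)
        (by intro j hj hjl; omega)]
  unfold pvBounds
  rw [List.countP_filter, PySem.List.pyRange_one]
  have hto : ((cs.length : Int) - 1).toNat = cs.length - 1 := by omega
  rw [hto, List.countP_map]
  have hcong : ∀ j ∈ List.range (cs.length - 1),
      (((fun a => decide (a ≤ (k : Int))
            && decide (PySem.List.pyGetD cs (PySem.List.pyGetD order a 0) ' '
                 ≠ PySem.List.pyGetD cs (PySem.List.pyGetD order (a - 1) 0) ' '))
          ∘ (fun j : Nat => (1 : Int) + j)) j = true)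
      ↔ ((fun j => decide (j < k) && pvFlagB cs order (j + 1)) j = true) := by
    intro j hj
    have hc1 : ((1 : Int) + (j : Int)) = ((j + 1 : Nat) : Int) := by push_cast; ring
    have hc2 : (((j + 1 : Nat) : Int)) - 1 = ((j : Nat) : Int) := by push_cast; ring
    have hle : ((((j + 1 : Nat) : Int)) ≤ (k : Int)) ↔ j < k := by omega
    simp only [Function.comp_apply, hc1, hc2, PySem.List.pyGetD_natCast, pvFlagB,
      Nat.add_sub_cancel, decide_eq_decide.mpr hle]
  rw [List.countP_congr hcong, pv_countP_range_cut _ _ k (by omega),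
      pvRank_eq_countP]

theorem pvB_pass (cs : List Char) (order : List Int)
    (hr : ∀ j < cs.length, PySem.Raise.InRange cs.length (order.getD j 0)) :
    ∀ k, k ≤ cs.length →
      (List.range k).foldl (fun clas (j : Nat) =>
        (fun clas i =>
          PySem.List.pySetD clas (PySem.List.pyGetD order i 0)
            ((pvCountLe (pvBounds cs order) i 0 (pvBounds cs order).length : Nat) : Int)) clas
          (0 + (j : Int)))
        (List.replicate cs.length (0 : Int))
      = pvScatter cs order k := by
  intro k
  induction k with
  | zero => intro _; simp [pvScatter]
  | succ k ih =>
    intro hk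
    rw [List.range_succ, List.foldl_append, ih (by omega), List.foldl_cons, List.foldl_nil]
    have hc : (0 + (k : Int)) = ((k : Nat) : Int) := by ring
    have hlen := pvScatter_length cs order k
    have hrk : PySem.Raise.InRange cs.length (order.getD k 0) := hr k (by omega)
    simp only [hc, PySem.List.pyGetD_natCast, pvCountLe_eq_rank cs order k (by omega)]
    rw [pvSetD_eq (by rw [hlen]; exact hrk), hlen, pvScatter_succ]

theorem pvB_eq (S : String) (order : List Int)
    (hr : ∀ j < S.toList.length, PySem.Raise.InRange S.toList.length (order.getD j 0)) :
    ComputeCharClasses_alt S order = pvScatter S.toList order S.toList.length := by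
  show (PySem.List.pyRange 0 S.toList.length 1).foldl
      (fun clas i => PySem.List.pySetD clas (PySem.List.pyGetD order i 0)
        ((pvCountLe (pvBounds S.toList order) i 0 (pvBounds S.toList order).length : Nat) : Int))
      (List.replicate S.toList.length (0 : Int)) = _
  rw [PySem.List.pyRange_one]
  have htn0 : (((S.toList.length : Int)) - 0).toNat = S.toList.length := by omega
  rw [htn0, List.foldl_map]
  exact pvB_pass S.toList order hr S.toList.length (le_refl _)

-- ===== VERDICT (by name: the statement is the Claim_ definition above) =====
theorem ComputeCharClasses_spec : Claim_equal_ComputeCharClasses := by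
  intro S order _ hpre
  obtain ⟨hne, hord, hr⟩ := hpre
  unfold Spec_ComputeCharClasses
  rw [pvB_eq S order hr]
  unfold ComputeCharClasses
  have hn : 0 < S.toList.length := List.length_pos_of_ne_nil hne
  have htn : (((S.toList.length : Int)) - 1).toNat = S.toList.length - 1 := by omega
  simp only [PySem.List.pyRange_one, htn, List.foldl_map]
  rw [pvA_loop S.toList order hr hn (S.toList.length - 1) (by omega)]
  have hmap : (S.toList.length - 1) + 1 = S.toList.length := by omega
  rw [hmap]
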